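-- pv_equiv track=rewrite | github.com/mathbeveridge/voter | sentence_construct.py | set_triple
-- ===== SOURCE A (Python) =====
-- A = 'A'
--
-- B = 'B'
--
-- def set_triple(word, triple, type):
--     word_copy = word.copy()
--
--     if type == A:
--         for i in range(triple[0]+1):
--             for j in range(i+1,triple[1]+1):
--                 if word[( i,j, triple[2])] < 0 :
--                     raise TypeError('incompatible', triple, type, word)
--                 word_copy[( i,j, triple[2])] = 1
--
--     if type == B:
--         for i in range(triple[1]+1,triple[2]+1):
--             if word[(triple[0], triple[1], i)] > 0:
--                 raise TypeError('incompatible', triple, type, word)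
--             word_copy[(triple[0], triple[1], i)] = -1
--
--     return word_copy
-- ===== SOURCE B (Python) =====
-- A = 'A'
--
-- B = 'B'
--
-- def set_triple(word, triple, type):
--     # Entry-driven single pass: instead of enumerating index ranges and doing a
--     # dict lookup per cell, scan the dict's entries once, classify each key by a
--     # closed-form region test, validate, and rebuild the dict in one comprehension.
--     if type == A:
--         hit = lambda a, b, c: c == triple[2] and 0 <= a <= triple[0] and a < b <= triple[1]
--         new = 1
--         bad = lambda v: v < 0
--     elif type == B:
--         hit = lambda a, b, c: a == triple[0] and b == triple[1] and triple[1] < c <= triple[2]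
--         new = -1
--         bad = lambda v: v > 0
--     else:
--         return word.copy()
--     if any(hit(*k) and bad(v) for k, v in word.items()):
--         raise TypeError('incompatible', triple, type, word)
--     return {k: (new if hit(*k) else v) for k, v in word.items()}
-- ===== Notes on version B (the rewrite author's own statement) =====
-- stated objective: alternative
-- what changed: A enumerates index ranges and does a dict lookup plus write per cell; B instead makes one entry-driven pass over the dict itself, classifying each key with a closed-form region test, validating with one any() over the entries, and rebuilding the dict in a single comprehension.
import Mathlib
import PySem

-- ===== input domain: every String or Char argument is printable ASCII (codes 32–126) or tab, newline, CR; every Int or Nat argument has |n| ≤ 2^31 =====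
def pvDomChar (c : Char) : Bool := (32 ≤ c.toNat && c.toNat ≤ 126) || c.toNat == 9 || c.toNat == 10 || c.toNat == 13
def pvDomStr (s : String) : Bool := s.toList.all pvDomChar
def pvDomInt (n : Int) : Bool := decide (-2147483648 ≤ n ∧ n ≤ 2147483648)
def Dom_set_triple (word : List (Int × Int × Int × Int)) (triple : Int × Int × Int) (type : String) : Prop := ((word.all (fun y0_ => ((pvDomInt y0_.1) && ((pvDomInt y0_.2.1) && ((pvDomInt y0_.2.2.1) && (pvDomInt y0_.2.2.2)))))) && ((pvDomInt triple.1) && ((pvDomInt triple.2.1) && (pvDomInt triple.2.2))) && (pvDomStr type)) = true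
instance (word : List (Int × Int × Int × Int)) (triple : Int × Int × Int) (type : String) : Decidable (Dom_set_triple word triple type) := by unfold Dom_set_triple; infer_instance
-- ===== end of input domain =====

-- B replaces A's index-range iteration (lookup + write per cell) with one entry-driven
-- pass over the dict: a closed-form region test per key, one any() validation over the
-- entries, and a single comprehension rebuilding the dict; objective: alternative.
-- The dict word is the flat association list required by the signature, so its primitives
-- (first-match lookup, overwrite-in-place set) are ported by hand below; both are exact
-- for a Python dict rendered as an insertion-ordered association list.

-- first-match lookup on the flat association list (= Python dict indexing; none = KeyError)
def pyLookup (word : List (Int × Int × Int × Int)) (k : Int × Int × Int) : Option Int :=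
  match word with
  | [] => none
  | (a, b, c, v) :: rest => if (a, b, c) = k then some v else pyLookup rest k

-- overwrite-in-place (= Python dict assignment; new keys append — unreachable here)
def pySet (word : List (Int × Int × Int × Int)) (k : Int × Int × Int) (v : Int) :
    List (Int × Int × Int × Int) :=
  match word with
  | [] => [(k.1, k.2.1, k.2.2, v)]
  | (a, b, c, w) :: rest =>
      if (a, b, c) = k then (a, b, c, v) :: rest else (a, b, c, w) :: pySet rest k v

-- ===== PORT A =====
-- A step for step; Option state: none = the raise (TypeError) / a missing key (KeyError)
def set_tripleCore (word : List (Int × Int × Int × Int)) (triple : Int × Int × Int)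
    (type : String) : Option (List (Int × Int × Int × Int)) :=
  let st1 : Option (List (Int × Int × Int × Int)) :=
    if type = "A" then
      (PySem.List.pyRange 0 (triple.1 + 1) 1).foldl (fun st i =>
        (PySem.List.pyRange (i + 1) (triple.2.1 + 1) 1).foldl (fun st j =>
          st.bind (fun wc =>
            match pyLookup word (i, j, triple.2.2) with
            | none => none
            | some v => if v < 0 then none else some (pySet wc (i, j, triple.2.2) 1))) st)
        (some word)
    else some word
  if type = "B" then
    (PySem.List.pyRange (triple.2.1 + 1) (triple.2.2 + 1) 1).foldl (fun st i =>
      st.bind (fun wc =>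
        match pyLookup word (triple.1, triple.2.1, i) with
        | none => none
        | some v => if 0 < v then none else some (pySet wc (triple.1, triple.2.1, i) (-1)))) st1
  else st1

def set_triple (word : List (Int × Int × Int × Int)) (triple : Int × Int × Int)
    (type : String) : List (Int × Int × Int × Int) :=
  (set_tripleCore word triple type).getD []   -- default unreachable under Pre_set_triple

-- ===== PORT B =====
-- Source B's closed-form region tests on a key
def hitA (triple : Int × Int × Int) (k : Int × Int × Int) : Bool :=
  decide (k.2.2 = triple.2.2 ∧ 0 ≤ k.1 ∧ k.1 ≤ triple.1 ∧ k.1 < k.2.1 ∧ k.2.1 ≤ triple.2.1)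

def hitB (triple : Int × Int × Int) (k : Int × Int × Int) : Bool :=
  decide (k.1 = triple.1 ∧ k.2.1 = triple.2.1 ∧ triple.2.1 < k.2.2 ∧ k.2.2 ≤ triple.2.2)

-- Source B: one any() validation over the entries, then one comprehension rebuilding the dict
def set_triple_alt (word : List (Int × Int × Int × Int)) (triple : Int × Int × Int)
    (type : String) : List (Int × Int × Int × Int) :=
  if type = "A" then
    if word.any (fun e => hitA triple (e.1, e.2.1, e.2.2.1) && decide (e.2.2.2 < 0)) then
      []   -- raise TypeError: unreachable under Pre_set_triple
    else
      word.map (fun e =>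
        if hitA triple (e.1, e.2.1, e.2.2.1) then (e.1, e.2.1, e.2.2.1, 1) else e)
  else if type = "B" then
    if word.any (fun e => hitB triple (e.1, e.2.1, e.2.2.1) && decide (0 < e.2.2.2)) then
      []   -- raise TypeError: unreachable under Pre_set_triple
    else
      word.map (fun e =>
        if hitB triple (e.1, e.2.1, e.2.2.1) then (e.1, e.2.1, e.2.2.1, -1) else e)
  else word

-- ===== PRECONDITION & SPEC =====
-- the cell is a present key whose (first-match) value is not bad: no KeyError, no TypeError
def cellOk (word : List (Int × Int × Int × Int)) (bad : Int → Bool) (c : Int × Int × Int) : Bool :=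
  match word.find? (fun e => (e.1, e.2.1, e.2.2.1) == c) with
  | none => false
  | some e => !bad e.2.2.2

-- the cells A's branch-A loops touch, with the outer range trimmed at triple.2.1: for
-- i ≥ triple.2.1 the inner range is empty, so this lists exactly the touched cells but
-- stays short for a huge triple.1
def cellsA' (triple : Int × Int × Int) : List (Int × Int × Int) :=
  (PySem.List.pyRange 0 (min (triple.1 + 1) triple.2.1) 1).flatMap (fun i =>
    (PySem.List.pyRange (i + 1) (triple.2.1 + 1) 1).map (fun j => (i, j, triple.2.2)))

-- the cells A's branch-B loop touches
def cellsB (triple : Int × Int × Int) : List (Int × Int × Int) :=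
  (PySem.List.pyRange (triple.2.1 + 1) (triple.2.2 + 1) 1).map
    (fun i => (triple.1, triple.2.1, i))

-- Pre_ = exactly the inputs on which A returns (every touched cell is a present key with
-- a compatible value), plus key-distinctness: word renders a Python dict, whose keys are
-- always distinct, so that conjunct excludes no Python input. The two length bounds are
-- CONSEQUENCES of the per-cell conditions (that many distinct keys must be present in
-- word) placed first so the instance decides quickly; they exclude nothing.
def Pre_set_triple (word : List (Int × Int × Int × Int)) (triple : Int × Int × Int)
    (type : String) : Prop :=
  (word.map (fun e => (e.1, e.2.1, e.2.2.1))).Nodup ∧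
  (type = "A" →
    (0 ≤ triple.1 → 1 ≤ triple.2.1 → triple.2.1 ≤ (word.length : Int)) ∧
    ∀ c ∈ cellsA' triple, cellOk word (fun v => decide (v < 0)) c = true) ∧
  (type = "B" →
    (triple.2.1 < triple.2.2 → triple.2.2 - triple.2.1 ≤ (word.length : Int)) ∧
    ∀ c ∈ cellsB triple, cellOk word (fun v => decide (0 < v)) c = true)

instance (word : List (Int × Int × Int × Int)) (triple : Int × Int × Int) (type : String) :
    Decidable (Pre_set_triple word triple type) := by unfold Pre_set_triple; infer_instance

def pvWitness_set_triple : (List (Int × Int × Int × Int)) × (Int × Int × Int) × String :=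
  ([(0, 1, 0, 5), (0, 1, 1, -2)], (0, 1, 0), "A")

def Spec_set_triple (word : List (Int × Int × Int × Int)) (triple : Int × Int × Int)
    (type : String) (out : List (Int × Int × Int × Int)) : Prop :=
  out = set_triple_alt word triple type
instance (word : List (Int × Int × Int × Int)) (triple : Int × Int × Int) (type : String)
    (out : List (Int × Int × Int × Int)) : Decidable (Spec_set_triple word triple type out) := by
  unfold Spec_set_triple; infer_instance

-- ===== CLAIM (what is proved, stated in full; the proofs are below) =====
def Claim_equal_set_triple : Prop :=
  ∀ (word : List (Int × Int × Int × Int)) (triple : Int × Int × Int) (type : String),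
    Dom_set_triple word triple type → Pre_set_triple word triple type →
      Spec_set_triple word triple type (set_triple word triple type)

-- ===== LEMMAS AND PROOFS =====

-- the key of an association-list entry
def eKey (e : Int × Int × Int × Int) : Int × Int × Int := (e.1, e.2.1, e.2.2.1)

-- the full (untrimmed) cell list of A's branch-A loops, for stating the loop shape
def cellsA (triple : Int × Int × Int) : List (Int × Int × Int) :=
  (PySem.List.pyRange 0 (triple.1 + 1) 1).flatMap (fun i =>
    (PySem.List.pyRange (i + 1) (triple.2.1 + 1) 1).map (fun j => (i, j, triple.2.2)))

-- A's write phase as a fold of pySet over the touched cells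
def applyAll (word : List (Int × Int × Int × Int)) (val : Int)
    (cells : List (Int × Int × Int)) : List (Int × Int × Int × Int) :=
  cells.foldl (fun wc c => pySet wc c val) word

-- fold over a flatMap = nested fold (shape of A's nested loops vs the cell list)
theorem foldl_flatMap_eq {α β σ : Type} (L : List α) (f : α → List β) (g : σ → β → σ)
    (init : σ) : (L.flatMap f).foldl g init = L.foldl (fun st a => (f a).foldl g st) init := by
  induction L generalizing init with
  | nil => rfl
  | cons x xs ih => simp [List.flatMap_cons, List.foldl_append, ih]

-- every cell of cellsA lies in the trimmed cellsA'
theorem mem_cellsA' {triple : Int × Int × Int} {c : Int × Int × Int}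
    (h : c ∈ cellsA triple) : c ∈ cellsA' triple := by
  simp only [cellsA, cellsA', List.mem_flatMap, List.mem_map,
    PySem.List.mem_pyRange_one] at h ⊢
  obtain ⟨i, hi, j, hj, rfl⟩ := h
  exact ⟨i, ⟨hi.1, by omega⟩, j, hj, rfl⟩

-- membership in the cell lists ↔ Source B's closed-form region tests
theorem mem_cellsA_iff (triple k : Int × Int × Int) :
    k ∈ cellsA triple ↔ hitA triple k = true := by
  simp only [cellsA, hitA, List.mem_flatMap, List.mem_map, PySem.List.mem_pyRange_one,
    decide_eq_true_eq]
  constructor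
  · rintro ⟨i, hi, j, hj, rfl⟩
    exact ⟨rfl, hi.1, by show i ≤ triple.1; omega, by show i < j; omega,
      by show j ≤ triple.2.1; omega⟩
  · rintro ⟨h2, h0, h1, hlt, hle⟩
    exact ⟨k.1, ⟨h0, by omega⟩, k.2.1, ⟨by omega, by omega⟩, by
      obtain ⟨a, b, c⟩ := k; simp_all⟩

theorem mem_cellsB_iff (triple k : Int × Int × Int) :
    k ∈ cellsB triple ↔ hitB triple k = true := by
  simp only [cellsB, hitB, List.mem_map, PySem.List.mem_pyRange_one, decide_eq_true_eq]
  constructor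
  · rintro ⟨i, hi, rfl⟩
    exact ⟨rfl, rfl, by show triple.2.1 < i; omega, by show i ≤ triple.2.2; omega⟩
  · rintro ⟨h0, h1, hlt, hle⟩
    exact ⟨k.2.2, ⟨by omega, by omega⟩, by obtain ⟨a, b, c⟩ := k; simp_all⟩

-- dict lookup is find? on the association list
theorem pyLookup_eq_find? (word : List (Int × Int × Int × Int)) (c : Int × Int × Int) :
    pyLookup word c = (word.find? (fun e => eKey e == c)).map (·.2.2.2) := by
  induction word with
  | nil => rfl
  | cons e rest ih =>
      obtain ⟨a, b, d, v⟩ := e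
      by_cases h : (a, b, d) = c
      · simp [pyLookup, List.find?, eKey, h]
      · have hb : ((a, b, d) == c) = false := by simp [h]
        simp [pyLookup, List.find?, eKey, h, hb, ih]

theorem cellOk_spec {word : List (Int × Int × Int × Int)} {bad : Int → Bool}
    {c : Int × Int × Int} (h : cellOk word bad c = true) :
    ∃ v, pyLookup word c = some v ∧ bad v = false := by
  unfold cellOk at h
  rw [pyLookup_eq_find?]
  cases hf : word.find? (fun e => (e.1, e.2.1, e.2.2.1) == c) with
  | none => rw [hf] at h; simp at h
  | some e =>
      rw [hf] at h
      have : (word.find? fun e => eKey e == c) = some e := by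
        simpa [eKey] using hf
      rw [this]
      exact ⟨e.2.2.2, rfl, by simpa using h⟩

-- a present cell's key is a key of word
theorem cellOk_mem_keys {word : List (Int × Int × Int × Int)} {bad : Int → Bool}
    {c : Int × Int × Int} (h : cellOk word bad c = true) : c ∈ word.map eKey := by
  obtain ⟨v, hv, _⟩ := cellOk_spec h
  rw [pyLookup_eq_find?] at hv
  cases hf : word.find? (fun e => eKey e == c) with
  | none => rw [hf] at hv; simp at hv
  | some e =>
      have he := List.find?_some hf
      have hmem := List.mem_of_find?_eq_some hf
      simp only [beq_iff_eq] at he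
      exact he ▸ List.mem_map_of_mem hmem

-- with distinct keys, the first-match lookup of an entry's own key finds its value
theorem pyLookup_self {word : List (Int × Int × Int × Int)}
    (hnd : (word.map eKey).Nodup) {e : Int × Int × Int × Int} (he : e ∈ word) :
    pyLookup word (eKey e) = some e.2.2.2 := by
  induction word with
  | nil => cases he
  | cons f rest ih =>
      obtain ⟨a, b, c, v⟩ := f
      simp only [List.map_cons, List.nodup_cons] at hnd
      rcases List.mem_cons.1 he with rfl | hmem
      · simp [pyLookup, eKey]
      · by_cases hk : (a, b, c) = eKey e
        · have hmm : eKey e ∈ rest.map eKey := List.mem_map_of_mem hmem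
          rw [← hk] at hmm
          exact absurd hmm hnd.1
        · simpa [pyLookup, hk] using ih hnd.2 hmem

-- when every cell is ok, A's Option-state fold never hits none and just applies the sets
theorem foldl_bind_ok (word : List (Int × Int × Int × Int)) (bad : Int → Prop)
    [DecidablePred bad] (val : Int) (cells : List (Int × Int × Int)) :
    ∀ w, (∀ c ∈ cells, cellOk word (fun v => decide (bad v)) c = true) →
      cells.foldl (fun st c =>
          st.bind (fun wc =>
            match pyLookup word c with
            | none => none
            | some v => if bad v then none else some (pySet wc c val))) (some w)
        = some (cells.foldl (fun wc c => pySet wc c val) w) := by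
  induction cells with
  | nil => intro w _; rfl
  | cons c rest ih =>
      intro w h
      obtain ⟨v, hv, hbadv⟩ := cellOk_spec (h c (List.mem_cons_self ..))
      have hnb : ¬ bad v := by simpa using hbadv
      simp only [List.foldl_cons, Option.bind_some, hv, if_neg hnb]
      exact ih _ (fun c' hc' => h c' (List.mem_cons_of_mem _ hc'))

-- with distinct keys and the key present, pySet is an entrywise replacement
theorem pySet_eq_map {word : List (Int × Int × Int × Int)} {k : Int × Int × Int}
    (hnd : (word.map eKey).Nodup) (hk : k ∈ word.map eKey) (v : Int) :
    pySet word k v = word.map (fun e => if eKey e = k then (k.1, k.2.1, k.2.2, v) else e) := by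
  induction word with
  | nil => cases hk
  | cons f rest ih =>
      obtain ⟨a, b, c, w⟩ := f
      simp only [List.map_cons, List.nodup_cons] at hnd
      by_cases h : (a, b, c) = k
      · have hrest : k ∉ rest.map eKey := by rw [← h]; exact hnd.1
        have hmap : rest.map (fun e => if eKey e = k then (k.1, k.2.1, k.2.2, v) else e)
            = rest := by
          conv_rhs => rw [← List.map_id rest]
          exact List.map_congr_left (fun e he => by
            have hne : eKey e ≠ k := fun hek => hrest (hek ▸ List.mem_map_of_mem he)
            simp [hne])
        rw [show pySet ((a, b, c, w) :: rest) k v = (a, b, c, v) :: rest from by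
              simp [pySet, h],
            List.map_cons, hmap]
        subst h
        simp [eKey]
      · rw [List.map_cons] at hk
        have hk' : k ∈ rest.map eKey := by
          rcases List.mem_cons.1 hk with heq | hmem
          · exact absurd heq.symm h
          · exact hmem
        rw [show pySet ((a, b, c, w) :: rest) k v = (a, b, c, w) :: pySet rest k v from by
              simp [pySet, h],
            List.map_cons, ih hnd.2 hk']
        congr 1
        simp [eKey, h]

-- pySet by an existing key preserves the key sequence
theorem map_eKey_pySet {word : List (Int × Int × Int × Int)} {k : Int × Int × Int}
    (hnd : (word.map eKey).Nodup) (hk : k ∈ word.map eKey) (v : Int) :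
    (pySet word k v).map eKey = word.map eKey := by
  rw [pySet_eq_map hnd hk v, List.map_map]
  refine List.map_congr_left (fun e _ => ?_)
  by_cases h : (e.1, e.2.1, e.2.2.1) = k
  · simp [eKey, ← h]
  · simp [eKey, h]

-- the write phase over a present cell list is one entrywise map over the dict
theorem applyAll_eq_map (val : Int) (cells : List (Int × Int × Int)) :
    ∀ (word : List (Int × Int × Int × Int)), (word.map eKey).Nodup →
      (∀ c ∈ cells, c ∈ word.map eKey) →
      applyAll word val cells
        = word.map (fun e => if eKey e ∈ cells then (e.1, e.2.1, e.2.2.1, val) else e) := by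
  induction cells with
  | nil => intro word _ _; simp [applyAll]
  | cons c rest ih =>
      intro word hnd hpres
      have hc : c ∈ word.map eKey := hpres c (List.mem_cons_self ..)
      have h1 : applyAll word val (c :: rest) = applyAll (pySet word c val) val rest := rfl
      rw [h1, ih (pySet word c val)
            (by rw [map_eKey_pySet hnd hc]; exact hnd)
            (fun c' hc' => by
              rw [map_eKey_pySet hnd hc]; exact hpres c' (List.mem_cons_of_mem _ hc')),
          pySet_eq_map hnd hc, List.map_map]
      refine List.map_congr_left (fun e _ => ?_)
      simp only [Function.comp_apply]
      obtain ⟨c1, c2, c3⟩ := c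
      obtain ⟨e1, e2, e3, e4⟩ := e
      by_cases h : (e1, e2, e3) = (c1, c2, c3)
      · obtain ⟨rfl, rfl, rfl⟩ : e1 = c1 ∧ e2 = c2 ∧ e3 = c3 := by simpa using h
        simp [eKey, ite_self, List.mem_cons]
      · simp [eKey, h, List.mem_cons]

-- under Pre_, Source B's validation any() is false
theorem any_false {word : List (Int × Int × Int × Int)} {hit : Int × Int × Int → Bool}
    {bad : Int → Bool} (hok : ∀ e ∈ word, hit (eKey e) = true → bad e.2.2.2 = false) :
    word.any (fun e => hit (e.1, e.2.1, e.2.2.1) && bad e.2.2.2) = false := by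
  rw [List.any_eq_false]
  intro e he
  simp only [Bool.and_eq_true, not_and]
  intro hh
  have hh' : hit (eKey e) = true := hh
  simp [hok e he hh']

-- ===== VERDICT (by name: the statement is the Claim_ definition above) =====
theorem set_triple_spec : Claim_equal_set_triple := by
  intro word triple type _ hPre
  obtain ⟨hnd, hPA, hPB⟩ := hPre
  unfold Spec_set_triple set_triple set_tripleCore set_triple_alt
  by_cases hA : type = "A"
  · subst hA
    have hok : ∀ c ∈ cellsA triple, cellOk word (fun v => decide (v < 0)) c = true :=
      fun c hc => (hPA rfl).2 c (mem_cellsA' hc)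
    -- A's loops compute some (applyAll word 1 (cellsA triple))
    have hnest :
        (PySem.List.pyRange 0 (triple.1 + 1) 1).foldl (fun st i =>
          (PySem.List.pyRange (i + 1) (triple.2.1 + 1) 1).foldl (fun st j =>
            st.bind (fun wc =>
              match pyLookup word (i, j, triple.2.2) with
              | none => none
              | some v => if v < 0 then none else some (pySet wc (i, j, triple.2.2) 1))) st)
          (some word)
        = some (applyAll word 1 (cellsA triple)) := by
      have h1 : _ = some (applyAll word 1 (cellsA triple)) :=
        foldl_bind_ok word (fun v => v < 0) 1 (cellsA triple) word hok
      rw [← h1, cellsA, foldl_flatMap_eq]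
      simp only [List.foldl_map]
    -- hit entries are good, so Source B's any() is false
    have hgood : ∀ e ∈ word, hitA triple (eKey e) = true → decide (e.2.2.2 < 0) = false := by
      intro e he hh
      have hcell : cellOk word (fun v => decide (v < 0)) (eKey e) = true :=
        hok (eKey e) ((mem_cellsA_iff triple (eKey e)).2 hh)
      obtain ⟨v, hv, hbad⟩ := cellOk_spec hcell
      rw [pyLookup_self hnd he] at hv
      exact (Option.some_inj.1 hv) ▸ hbad
    have hany := any_false (hit := hitA triple) (bad := fun v => decide (v < 0)) hgood
    have hany' : (word.any fun e =>
        hitA triple (e.1, e.2.1, e.2.2.1) && decide (e.2.2.2 < 0)) = false := hany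
    rw [if_pos rfl, if_pos rfl, if_neg (by decide : ¬("A" : String) = "B"), hnest,
      Option.getD_some, hany']
    rw [if_neg (by simp : ¬(false = true)),
      applyAll_eq_map 1 (cellsA triple) word hnd
        (fun c hc => cellOk_mem_keys (hok c hc))]
    refine List.map_congr_left (fun e _ => ?_)
    simp only [eKey]
    by_cases h : hitA triple (e.1, e.2.1, e.2.2.1) = true
    · rw [if_pos ((mem_cellsA_iff triple _).2 h), if_pos h]
    · rw [if_neg (fun hm => h ((mem_cellsA_iff triple _).1 hm)), if_neg h]
  · by_cases hB : type = "B"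
    · subst hB
      have hok : ∀ c ∈ cellsB triple, cellOk word (fun v => decide (0 < v)) c = true :=
        fun c hc => (hPB rfl).2 c hc
      have hlin :
          (PySem.List.pyRange (triple.2.1 + 1) (triple.2.2 + 1) 1).foldl (fun st i =>
            st.bind (fun wc =>
              match pyLookup word (triple.1, triple.2.1, i) with
              | none => none
              | some v => if 0 < v then none else
                  some (pySet wc (triple.1, triple.2.1, i) (-1)))) (some word)
          = some (applyAll word (-1) (cellsB triple)) := by
        have h1 : _ = some (applyAll word (-1) (cellsB triple)) :=
          foldl_bind_ok word (fun v => 0 < v) (-1) (cellsB triple) word hok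
        rw [← h1, cellsB]
        simp only [List.foldl_map]
      have hgood : ∀ e ∈ word, hitB triple (eKey e) = true → decide (0 < e.2.2.2) = false := by
        intro e he hh
        have hcell : cellOk word (fun v => decide (0 < v)) (eKey e) = true :=
          hok (eKey e) ((mem_cellsB_iff triple (eKey e)).2 hh)
        obtain ⟨v, hv, hbad⟩ := cellOk_spec hcell
        rw [pyLookup_self hnd he] at hv
        exact (Option.some_inj.1 hv) ▸ hbad
      have hany := any_false (hit := hitB triple) (bad := fun v => decide (0 < v)) hgood
      have hany' : (word.any fun e =>
          hitB triple (e.1, e.2.1, e.2.2.1) && decide (0 < e.2.2.2)) = false := hany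
      rw [if_neg (by decide : ¬("B" : String) = "A"),
        if_neg (by decide : ¬("B" : String) = "A"), if_pos rfl, hlin, Option.getD_some,
        if_pos rfl, hany']
      rw [if_neg (by simp : ¬(false = true)),
        applyAll_eq_map (-1) (cellsB triple) word hnd
          (fun c hc => cellOk_mem_keys (hok c hc))]
      refine List.map_congr_left (fun e _ => ?_)
      simp only [eKey]
      by_cases h : hitB triple (e.1, e.2.1, e.2.2.1) = true
      · rw [if_pos ((mem_cellsB_iff triple _).2 h), if_pos h]
      · rw [if_neg (fun hm => h ((mem_cellsB_iff triple _).1 hm)), if_neg h]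
    · simp only [if_neg hA, if_neg hB, Option.getD_some]
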